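-- pv_equiv track=rewrite | github.com/Kyeongrok/python_algorithm | programmers/greedy/05_joystick_2.py | shortest_next
-- ===== SOURCE A (Python) =====
-- def shortest_next(name):
--     min_move = len(name) - 1
--     for i in range(len(name)):
--         # a가 아닌 알파벳이 나오는 idx까지 역으로 가는 경우
--         if name[i] != 'A':
--             next = i + 1
--             while next < len(name) and name[next] == 'A':
--                 next += 1
--             move = 2 * i + len(name) - next
--             min_move = min(move, min_move)
--     return min_move
-- ===== SOURCE B (Python) =====
-- def shortest_next(name):
--     positions = [j for j in range(len(name)) if name[j] != 'A']
--     min_move = len(name) - 1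
--     for k in range(len(positions)):
--         i = positions[k]
--         nxt = positions[k + 1] if k + 1 < len(positions) else len(name)
--         move = 2 * i + len(name) - nxt
--         min_move = min(move, min_move)
--     return min_move
-- ===== Notes on version B (the rewrite author's own statement) =====
-- stated objective: simpler
-- what changed: Precomputes the list of positions of letters other than the rest character in one scan and does a single flat pass over consecutive such positions, eliminating A's nested inner while-scan.
import Mathlib
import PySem

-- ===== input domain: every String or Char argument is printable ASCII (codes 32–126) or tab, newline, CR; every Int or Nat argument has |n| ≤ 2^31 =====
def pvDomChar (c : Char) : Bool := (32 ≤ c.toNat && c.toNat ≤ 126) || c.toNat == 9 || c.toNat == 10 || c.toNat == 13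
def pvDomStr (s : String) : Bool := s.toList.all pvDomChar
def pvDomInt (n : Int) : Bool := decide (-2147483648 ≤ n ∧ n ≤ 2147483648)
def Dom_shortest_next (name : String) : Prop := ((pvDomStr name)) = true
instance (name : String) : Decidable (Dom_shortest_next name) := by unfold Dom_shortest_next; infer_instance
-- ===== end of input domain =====

-- B replaces A's nested while-scan by a precomputed list of non-'A' positions and one flat pass (simpler).

-- ===== PORT A =====
-- inner `while next < len(name) and name[next] == 'A': next += 1` (indices stay ≤ length, so getD is exact)
def pvScanA (s : List Char) (next : Nat) : Nat :=
  if h : next < s.length ∧ s.getD next ' ' = 'A' then pvScanA s (next + 1) else next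
termination_by s.length - next
decreasing_by omega

-- literal port of A: fold over range(len(name)); name[i] with i < len is exact via getD
def shortest_next (name : String) : Int :=
  (List.range name.toList.length).foldl
    (fun min_move i =>
      if name.toList.getD i ' ' ≠ 'A' then
        min (2 * (i : Int) + (name.toList.length : Int) - (pvScanA name.toList (i + 1) : Int))
          min_move
      else min_move)
    ((name.toList.length : Int) - 1)

-- ===== PORT B =====
-- positions = [j for j in range(len(name)) if name[j] != 'A'], then one flat pass over k
def shortest_next_alt (name : String) : Int :=
  let positions := (List.range name.toList.length).filter
    (fun j => name.toList.getD j ' ' ≠ 'A')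
  (List.range positions.length).foldl
    (fun min_move k =>
      min (2 * ((positions.getD k 0 : Nat) : Int) + (name.toList.length : Int) -
        (((if k + 1 < positions.length then positions.getD (k + 1) 0
           else name.toList.length) : Nat) : Int))
        min_move)
    ((name.toList.length : Int) - 1)

-- ===== PRECONDITION & SPEC =====
def Spec_shortest_next (name : String) (out : Int) : Prop := out = shortest_next_alt name
instance (name : String) (out : Int) : Decidable (Spec_shortest_next name out) := by unfold Spec_shortest_next; infer_instance

-- ===== CLAIM (what is proved, stated in full; the proofs are below) =====
def Claim_equal_shortest_next : Prop := ∀ (name : String), Dom_shortest_next name → Spec_shortest_next name (shortest_next name)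

-- ===== LEMMAS AND PROOFS =====

-- first element of L that is ≥ j, default d
def pvFirstGe (d j : Nat) : List Nat → Nat
  | [] => d
  | a :: t => if j ≤ a then a else pvFirstGe d j t

-- consecutive-pairs view: F applied to each element and its successor (default d)
def pvConsec (F : Nat → Nat → Int) (d : Nat) : List Nat → List Int
  | [] => []
  | a :: t => F a (t.headD d) :: pvConsec F d t

theorem firstGe_all_lt {d j : Nat} {L : List Nat} (h : ∀ x ∈ L, x < j) :
    pvFirstGe d j L = d := by
  induction L with
  | nil => rfl
  | cons a t ih =>
    have := h a (by simp)
    rw [pvFirstGe, if_neg (by omega)]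
    exact ih (fun x hx => h x (by simp [hx]))

theorem firstGe_self {d j : Nat} {L : List Nat} (hs : L.Pairwise (· < ·)) (hj : j ∈ L) :
    pvFirstGe d j L = j := by
  induction L with
  | nil => simp at hj
  | cons a t ih =>
    rcases List.mem_cons.mp hj with h | h
    · rw [pvFirstGe, if_pos (by omega)]; omega
    · have : a < j := (List.pairwise_cons.mp hs).1 j h
      rw [pvFirstGe, if_neg (by omega)]
      exact ih (List.pairwise_cons.mp hs).2 h

theorem firstGe_succ {d j : Nat} {L : List Nat} (hj : j ∉ L) :
    pvFirstGe d j L = pvFirstGe d (j + 1) L := by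
  induction L with
  | nil => rfl
  | cons a t ih =>
    have hne : a ≠ j := fun h => hj (by simp [h])
    have ih' := ih (fun hm => hj (by simp [hm]))
    by_cases h : j ≤ a
    · rw [pvFirstGe, if_pos h, pvFirstGe, if_pos (by omega)]
    · rw [pvFirstGe, if_neg h, pvFirstGe, if_neg (by omega), ih']

-- characterization of A's inner while loop: first non-'A' index ≥ j (default length)
theorem pvScanA_eq (s : List Char) :
    ∀ fuel j, s.length - j ≤ fuel → j ≤ s.length →
      pvScanA s j = pvFirstGe s.length j
        ((List.range s.length).filter (fun j => s.getD j ' ' ≠ 'A')) := by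
  intro fuel
  induction fuel with
  | zero =>
    intro j h1 h2
    have hj : j = s.length := by omega
    subst hj
    rw [pvScanA, dif_neg (fun h => absurd h.1 (by omega))]
    refine (firstGe_all_lt ?_).symm
    intro x hx
    exact List.mem_range.mp (List.mem_filter.mp hx).1
  | succ fuel ih =>
    intro j h1 h2
    by_cases hjn : j < s.length
    · by_cases hA : s.getD j ' ' = 'A'
      · rw [pvScanA, dif_pos ⟨hjn, hA⟩, ih (j + 1) (by omega) (by omega)]
        refine (firstGe_succ ?_).symm
        intro hm
        exact of_decide_eq_true (List.mem_filter.mp hm).2 hA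
      · rw [pvScanA, dif_neg (fun h => hA h.2)]
        refine (firstGe_self ?_ ?_).symm
        · exact List.Pairwise.sublist List.filter_sublist List.pairwise_lt_range
        · exact List.mem_filter.mpr ⟨List.mem_range.mpr hjn, decide_eq_true hA⟩
    · have hj : j = s.length := by omega
      subst hj
      rw [pvScanA, dif_neg (fun h => absurd h.1 (by omega))]
      refine (firstGe_all_lt ?_).symm
      intro x hx
      exact List.mem_range.mp (List.mem_filter.mp hx).1

-- B's indexed pass over positions equals the consecutive-pairs view
theorem map_range_consec (F : Nat → Nat → Int) (d : Nat) :
    ∀ L : List Nat,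
      (List.range L.length).map
        (fun k => F (L.getD k 0) (if k + 1 < L.length then L.getD (k + 1) 0 else d))
      = pvConsec F d L := by
  intro L
  induction L with
  | nil => rfl
  | cons a t ih =>
    simp only [List.length_cons, List.range_succ_eq_map, List.map_cons, List.map_map]
    rw [pvConsec]
    congr 1
    · cases t <;> simp
    · rw [← ih]
      apply List.map_congr_left
      intro k hk
      simp only [Function.comp_apply, Nat.succ_eq_add_one, List.getD_cons_succ,
        Nat.add_lt_add_iff_right]

-- A's per-position values (via pvFirstGe over the whole sorted list) equal the consecutive-pairs view
theorem map_firstGe_consec (F : Nat → Nat → Int) (d : Nat) :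
    ∀ L : List Nat, L.Pairwise (· < ·) →
      L.map (fun i => F i (pvFirstGe d (i + 1) L)) = pvConsec F d L := by
  intro L
  induction L with
  | nil => intro _; rfl
  | cons a t ih =>
    intro hs
    obtain ⟨hlt, hst⟩ := List.pairwise_cons.mp hs
    rw [List.map_cons, pvConsec]
    congr 1
    · rw [pvFirstGe, if_neg (by omega)]
      cases t with
      | nil => rfl
      | cons b t' =>
        have : a + 1 ≤ b := hlt b (by simp)
        rw [pvFirstGe, if_pos this]
        rfl
    · rw [← ih hst]
      apply List.map_congr_left
      intro i hi
      have : ¬ i + 1 ≤ a := by have := hlt i hi; omega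
      rw [pvFirstGe, if_neg this]

-- fold with an if-guard over a list equals fold over the filtered list
theorem foldl_if_filter {α : Type} (p : Nat → Prop) [DecidablePred p] (G : α → Nat → α) :
    ∀ (l : List Nat) (a : α),
      l.foldl (fun acc i => if p i then G acc i else acc) a
        = (l.filter (fun i => decide (p i))).foldl G a := by
  intro l
  induction l with
  | nil => intro a; rfl
  | cons x t ih =>
    intro a
    by_cases h : p x <;> simp [h, ih]


-- fold of running min equals fold over the mapped value list
theorem foldl_min_eq_map (g : Nat → Int) :
    ∀ (l : List Nat) (a : Int),
      l.foldl (fun acc i => min (g i) acc) a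
        = (l.map g).foldl (fun acc m => min m acc) a := by
  intro l
  induction l with
  | nil => intro a; rfl
  | cons x t ih => intro a; simp [List.foldl_cons, ih]

-- ===== VERDICT (by name: the statement is the Claim_ definition above) =====
theorem shortest_next_spec : Claim_equal_shortest_next := by
  intro name _
  simp only [Spec_shortest_next, shortest_next, shortest_next_alt]
  rw [foldl_if_filter (fun i => name.toList.getD i ' ' ≠ 'A')
      (fun acc i => min (2 * (i : Int) + (name.toList.length : Int) -
        (pvScanA name.toList (i + 1) : Int)) acc)]
  set s := name.toList with hs
  set n := s.length with hn
  set P := (List.range n).filter (fun j => decide (s.getD j ' ' ≠ 'A')) with hP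
  have hPsorted : P.Pairwise (· < ·) :=
    List.Pairwise.sublist List.filter_sublist List.pairwise_lt_range
  have hPlt : ∀ i ∈ P, i < n := fun i hi => List.mem_range.mp (List.mem_filter.mp hi).1
  refine Eq.trans (foldl_min_eq_map _ P _)
    (Eq.trans ?_ (foldl_min_eq_map _ (List.range P.length) _).symm)
  congr 1
  have h1 : P.map (fun i : Nat => 2 * (i : Int) + (n : Int) - (pvScanA s (i + 1) : Int))
      = P.map (fun i : Nat => 2 * (i : Int) + (n : Int) - (pvFirstGe n (i + 1) P : Int)) := by
    apply List.map_congr_left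
    intro i hi
    rw [pvScanA_eq s (n - (i + 1)) (i + 1) (by omega) (hPlt i hi)]
  rw [h1,
    map_firstGe_consec (fun i nxt => 2 * (i : Int) + (n : Int) - (nxt : Int)) n P hPsorted,
    ← map_range_consec (fun i nxt => 2 * (i : Int) + (n : Int) - (nxt : Int)) n P]
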